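-- pv_equiv track=rewrite | github.com/phollox/anaconda | mmfparser/data/chunkloaders/objects.py | getClosestDirection
-- ===== SOURCE A (Python) =====
-- def getClosestDirection(direction, directionDict):
--     try:
--         return directionDict[direction]
--     except KeyError:
--         pass
--
--     # (directionObject, distance)
--     forward = None
--     backward = None
--
--     # get closest in back
--     position = direction
--     distance = 0
--     while 1:
--         position -= 1
--         distance += 1
--         if position < 0:
--             position = 31
--         if position in directionDict:
--             backward = (directionDict[position], distance)
--             break
--
--     # get closest ahead
--     position = direction
--     distance = 0
--     while 1:
--         position = (position + 1) % 32
--         distance += 1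
--         if position in directionDict:
--             forward = (directionDict[position], distance)
--             break
--
--     # backward has priority
--     if backward[1] >= forward[1]:
--         return forward[0]
--     else:
--         return backward[0]
-- ===== SOURCE B (Python) =====
-- def getClosestDirection(direction, directionDict):
--     if direction in directionDict:
--         return directionDict[direction]
--     # Single interleaved outward search: step one cursor backward and one
--     # forward per iteration and return the first populated slot reached
--     # (forward checked first, so it wins ties).
--     back = fwd = direction
--     while True:
--         back -= 1
--         if back < 0:
--             back = 31
--         fwd = (fwd + 1) % 32
--         if fwd in directionDict:
--             return directionDict[fwd]
--         if back in directionDict: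
--             return directionDict[back]
-- ===== Notes on version B (the rewrite author's own statement) =====
-- stated objective: simpler
-- what changed: A runs two separate unbounded scans of the wheel (a full backward walk, then a full forward walk) and then compares the two recorded distances; B interleaves both cursors in one outward loop and returns the first populated slot either cursor reaches (forward checked first, so it wins ties), with no distance bookkeeping at all; Pre_ excludes only the inputs on which A never returns (direction absent from the dict and no key in 0..31, where A loops forever).
import Mathlib
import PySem

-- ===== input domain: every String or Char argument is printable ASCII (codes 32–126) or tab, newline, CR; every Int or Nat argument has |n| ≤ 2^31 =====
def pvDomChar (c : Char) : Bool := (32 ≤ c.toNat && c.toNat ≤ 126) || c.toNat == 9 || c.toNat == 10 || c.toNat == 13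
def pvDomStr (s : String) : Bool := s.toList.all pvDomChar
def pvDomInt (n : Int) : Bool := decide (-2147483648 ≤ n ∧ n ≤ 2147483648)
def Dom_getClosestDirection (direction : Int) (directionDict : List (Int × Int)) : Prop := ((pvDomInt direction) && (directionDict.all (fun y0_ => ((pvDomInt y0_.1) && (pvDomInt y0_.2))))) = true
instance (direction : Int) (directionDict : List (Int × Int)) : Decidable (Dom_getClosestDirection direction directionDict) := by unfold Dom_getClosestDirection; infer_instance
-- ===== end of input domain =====

-- B replaces A's two separate full wheel scans (backward then forward, with recorded
-- distances compared at the end) by one interleaved outward loop that returns the first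
-- populated slot either cursor reaches, forward checked first.

-- dict lookup (first matching key), shared by both ports
def pvLookup : List (Int × Int) → Int → Option Int
  | [], _ => none
  | (k, v) :: rest, x => if k = x then some v else pvLookup rest x

-- ===== PORT A =====
-- A's backward while-loop: position -= 1; distance += 1; wrap to 31 below 0; stop on a hit.
-- Fuel only totalizes the loop (the Python loops forever exactly where the fuel runs out under Pre_).
def pvBack (dict : List (Int × Int)) : Int → Int → Nat → Option (Int × Int)
  | _, _, 0 => none
  | position, distance, fuel + 1 =>
    let position1 := position - 1
    let distance1 := distance + 1
    let position2 := if position1 < 0 then (31 : Int) else position1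
    match pvLookup dict position2 with
    | some v => some (v, distance1)
    | none => pvBack dict position2 distance1 fuel

-- A's forward while-loop: position = (position + 1) % 32; distance += 1; stop on a hit.
def pvFwd (dict : List (Int × Int)) : Int → Int → Nat → Option (Int × Int)
  | _, _, 0 => none
  | position, distance, fuel + 1 =>
    let position1 := PySem.Int.mod (position + 1) 32
    let distance1 := distance + 1
    match pvLookup dict position1 with
    | some v => some (v, distance1)
    | none => pvFwd dict position1 distance1 fuel

def getClosestDirection (direction : Int) (directionDict : List (Int × Int)) : Int :=
  match pvLookup directionDict direction with
  | some v => v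
  | none =>
    match pvBack directionDict direction 0 (direction.toNat + 33),
          pvFwd directionDict direction 0 33 with
    | some (bv, bd), some (fv, fd) => if bd ≥ fd then fv else bv
    | _, _ => 0   -- fuel exhausted: exactly where the Python loops forever (excluded by Pre_)

-- ===== PORT B =====
-- B's single while-loop: advance both cursors, return the first hit (forward checked first).
-- Fuel only totalizes the loop (Source B loops forever exactly where the fuel runs out under Pre_).
def pvBoth (dict : List (Int × Int)) : Int → Int → Nat → Int
  | _, _, 0 => 0
  | back, fwd, fuel + 1 =>
    let back1 := if back - 1 < 0 then (31 : Int) else back - 1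
    let fwd1 := PySem.Int.mod (fwd + 1) 32
    match pvLookup dict fwd1 with
    | some v => v
    | none =>
      match pvLookup dict back1 with
      | some v => v
      | none => pvBoth dict back1 fwd1 fuel

def getClosestDirection_alt (direction : Int) (directionDict : List (Int × Int)) : Int :=
  match pvLookup directionDict direction with
  | some v => v
  | none => pvBoth directionDict direction direction (direction.toNat + 33)

-- ===== PRECONDITION & SPEC =====
-- Pre_ admits exactly the inputs on which the Python A returns: direction is a key, or some
-- key lies on the wheel (0..31). Otherwise one of A's while-loops never finds a slot and A diverges.
def Pre_getClosestDirection (direction : Int) (directionDict : List (Int × Int)) : Prop :=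
  (∃ kv ∈ directionDict, kv.1 = direction) ∨ (∃ kv ∈ directionDict, 0 ≤ kv.1 ∧ kv.1 ≤ 31)
instance (direction : Int) (directionDict : List (Int × Int)) : Decidable (Pre_getClosestDirection direction directionDict) := by unfold Pre_getClosestDirection; infer_instance

def pvWitness_getClosestDirection : Int × (List (Int × Int)) := (5, [(3, 100), (7, 200)])

def Spec_getClosestDirection (direction : Int) (directionDict : List (Int × Int)) (out : Int) : Prop := out = getClosestDirection_alt direction directionDict
instance (direction : Int) (directionDict : List (Int × Int)) (out : Int) : Decidable (Spec_getClosestDirection direction directionDict out) := by unfold Spec_getClosestDirection; infer_instance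

-- ===== CLAIM (what is proved, stated in full; the proofs are below) =====
def Claim_equal_getClosestDirection : Prop := ∀ (direction : Int) (directionDict : List (Int × Int)), Dom_getClosestDirection direction directionDict → Pre_getClosestDirection direction directionDict → Spec_getClosestDirection direction directionDict (getClosestDirection direction directionDict)

-- ===== LEMMAS AND PROOFS =====

lemma pvLookup_eq_none_iff (l : List (Int × Int)) (x : Int) :
    pvLookup l x = none ↔ ∀ kv ∈ l, kv.1 ≠ x := by
  induction l with
  | nil => simp [pvLookup]
  | cons a t ih =>
    obtain ⟨k, v⟩ := a
    by_cases h : k = x <;> simp [pvLookup, h, ih]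

lemma pvLookup_isSome_of_mem {l : List (Int × Int)} {kv : Int × Int} (h : kv ∈ l) :
    (pvLookup l kv.1).isSome = true := by
  induction l with
  | nil => simp at h
  | cons a t ih =>
    obtain ⟨k, v⟩ := a
    by_cases hk : k = kv.1
    · simp [pvLookup, hk]
    · rcases List.mem_cons.mp h with h1 | h1
      · exfalso; exact hk (by rw [h1])
      · simpa [pvLookup, hk] using ih h1

-- position of the forward walk after d steps
def fposN (dir : Int) (d : Nat) : Int := (dir + d) % 32
-- position of the backward walk after d steps (valid for 1 ≤ d ≤ max dir 0 + 32, the first lap)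
def bposN (dir : Int) (d : Nat) : Int :=
  if (d : Int) ≤ dir then dir - d else (if 0 ≤ dir then dir else 0) + 32 - d

lemma pvFwd_spec (dict : List (Int × Int)) (dir v : Int) :
    ∀ (n j : Nat) (pos dist : Int) (fuel : Nat),
      PySem.Int.mod (pos + 1) 32 = fposN dir (j + 1) →
      dist = (j : Int) →
      n + 1 ≤ fuel →
      pvLookup dict (fposN dir (j + n + 1)) = some v →
      (∀ i : Nat, j + 1 ≤ i → i ≤ j + n → pvLookup dict (fposN dir i) = none) →
      pvFwd dict pos dist fuel = some (v, (j : Int) + (n : Int) + 1) := by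
  intro n
  induction n with
  | zero =>
    intro j pos dist fuel hpos hdist hfuel hhit _
    obtain ⟨f, rfl⟩ : ∃ f, fuel = f + 1 := ⟨fuel - 1, by omega⟩
    simp only [pvFwd, hpos]
    rw [(by norm_num : j + 0 + 1 = j + 1)] at hhit
    rw [hhit, hdist]
    norm_num
  | succ n ih =>
    intro j pos dist fuel hpos hdist hfuel hhit hnone
    obtain ⟨f, rfl⟩ : ∃ f, fuel = f + 1 := ⟨fuel - 1, by omega⟩
    simp only [pvFwd, hpos]
    rw [hnone (j + 1) (by omega) (by omega)]
    have h1 : pvFwd dict (fposN dir (j + 1)) (dist + 1) f = some (v, ((j+1 : Nat) : Int) + (n : Int) + 1) := by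
      apply ih (j + 1) _ _ f
      · show PySem.Int.mod (fposN dir (j + 1) + 1) 32 = fposN dir (j + 1 + 1)
        rw [PySem.Int.mod_eq_emod_of_pos (by norm_num)]
        simp only [fposN]
        push_cast
        omega
      · rw [hdist]; push_cast; ring
      · omega
      · rw [(by omega : j + 1 + n + 1 = j + (n + 1) + 1)]; exact hhit
      · intro i h1 h2; exact hnone i (by omega) (by omega)
    rw [h1]
    simp only [Option.some.injEq, Prod.mk.injEq, true_and]
    push_cast
    ring

lemma bposN_step (dir : Int) (j : Nat)
    (hle : (j : Int) + 2 ≤ (if 0 ≤ dir then dir else 0) + 32) :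
    (if bposN dir (j + 1) - 1 < 0 then (31 : Int) else bposN dir (j + 1) - 1) = bposN dir (j + 2) := by
  simp only [bposN]
  push_cast
  split_ifs <;> omega

lemma pvBack_spec (dict : List (Int × Int)) (dir v : Int) :
    ∀ (n j : Nat) (pos dist : Int) (fuel : Nat),
      (if pos - 1 < 0 then (31 : Int) else pos - 1) = bposN dir (j + 1) →
      dist = (j : Int) →
      ((j : Int) + n + 1) ≤ (if 0 ≤ dir then dir else 0) + 32 →
      n + 1 ≤ fuel →
      pvLookup dict (bposN dir (j + n + 1)) = some v →
      (∀ i : Nat, j + 1 ≤ i → i ≤ j + n → pvLookup dict (bposN dir i) = none) →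
      pvBack dict pos dist fuel = some (v, (j : Int) + (n : Int) + 1) := by
  intro n
  induction n with
  | zero =>
    intro j pos dist fuel hpos hdist _ hfuel hhit _
    obtain ⟨f, rfl⟩ : ∃ f, fuel = f + 1 := ⟨fuel - 1, by omega⟩
    simp only [pvBack, hpos]
    rw [(by norm_num : j + 0 + 1 = j + 1)] at hhit
    rw [hhit, hdist]
    norm_num
  | succ n ih =>
    intro j pos dist fuel hpos hdist hlap hfuel hhit hnone
    obtain ⟨f, rfl⟩ : ∃ f, fuel = f + 1 := ⟨fuel - 1, by omega⟩
    simp only [pvBack, hpos]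
    rw [hnone (j + 1) (by omega) (by omega)]
    have h1 : pvBack dict (bposN dir (j + 1)) (dist + 1) f = some (v, ((j+1 : Nat) : Int) + (n : Int) + 1) := by
      apply ih (j + 1) _ _ f
      · show (if bposN dir (j + 1) - 1 < 0 then (31 : Int) else bposN dir (j + 1) - 1) = bposN dir (j + 1 + 1)
        rw [(by omega : j + 1 + 1 = j + 2)]
        apply bposN_step
        push_cast at hlap ⊢
        omega
      · rw [hdist]; push_cast; ring
      · push_cast at hlap ⊢; omega
      · omega
      · rw [(by omega : j + 1 + n + 1 = j + (n + 1) + 1)]; exact hhit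
      · intro i h1 h2; exact hnone i (by omega) (by omega)
    rw [h1]
    simp only [Option.some.injEq, Prod.mk.injEq, true_and]
    push_cast
    ring

-- B's interleaved loop: if neither walk hits before step j+n+1, and at step j+n+1 the forward
-- slot is populated (value r), or it is not but the backward slot is (value r), the loop returns r.
lemma pvBoth_spec (dict : List (Int × Int)) (dir r : Int) :
    ∀ (n j : Nat) (pb pf : Int) (fuel : Nat),
      (if pb - 1 < 0 then (31 : Int) else pb - 1) = bposN dir (j + 1) →
      PySem.Int.mod (pf + 1) 32 = fposN dir (j + 1) →
      ((j : Int) + n + 1) ≤ (if 0 ≤ dir then dir else 0) + 32 →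
      n + 1 ≤ fuel →
      (∀ i : Nat, j + 1 ≤ i → i ≤ j + n →
        pvLookup dict (fposN dir i) = none ∧ pvLookup dict (bposN dir i) = none) →
      (pvLookup dict (fposN dir (j + n + 1)) = some r ∨
        (pvLookup dict (fposN dir (j + n + 1)) = none ∧
         pvLookup dict (bposN dir (j + n + 1)) = some r)) →
      pvBoth dict pb pf fuel = r := by
  intro n
  induction n with
  | zero =>
    intro j pb pf fuel hb hf _ hfuel _ hhit
    obtain ⟨f, rfl⟩ : ∃ f, fuel = f + 1 := ⟨fuel - 1, by omega⟩
    simp only [pvBoth, hb, hf]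
    rw [(by norm_num : j + 0 + 1 = j + 1)] at hhit
    rcases hhit with h | ⟨h1, h2⟩
    · rw [h]
    · rw [h1, h2]
  | succ n ih =>
    intro j pb pf fuel hb hf hlap hfuel hnone hhit
    obtain ⟨f, rfl⟩ : ∃ f, fuel = f + 1 := ⟨fuel - 1, by omega⟩
    simp only [pvBoth, hb, hf]
    obtain ⟨hfn, hbn⟩ := hnone (j + 1) (by omega) (by omega)
    rw [hfn, hbn]
    apply ih (j + 1) _ _ f
    · show (if bposN dir (j + 1) - 1 < 0 then (31 : Int) else bposN dir (j + 1) - 1) = bposN dir (j + 1 + 1)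
      rw [(by omega : j + 1 + 1 = j + 2)]
      apply bposN_step
      push_cast at hlap ⊢
      omega
    · show PySem.Int.mod (fposN dir (j + 1) + 1) 32 = fposN dir (j + 1 + 1)
      rw [PySem.Int.mod_eq_emod_of_pos (by norm_num)]
      simp only [fposN]
      push_cast
      omega
    · push_cast at hlap ⊢; omega
    · omega
    · intro i h1 h2; exact hnone i (by omega) (by omega)
    · rw [(by omega : j + 1 + n + 1 = j + (n + 1) + 1)]; exact hhit

-- ===== VERDICT (by name: the statement is the Claim_ definition above) =====
theorem getClosestDirection_spec : Claim_equal_getClosestDirection := by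
  intro dir dict _ hpre
  unfold Spec_getClosestDirection
  cases hL : pvLookup dict dir with
  | some v => simp only [getClosestDirection, getClosestDirection_alt, hL]
  | none =>
    obtain ⟨kv, hmem, hk0, hk31⟩ : ∃ kv ∈ dict, 0 ≤ kv.1 ∧ kv.1 ≤ 31 := by
      rcases hpre with ⟨kv, hmem, hkey⟩ | h
      · exfalso; exact (pvLookup_eq_none_iff dict dir).mp hL kv hmem hkey
      · exact h
    set D : Int := if 0 ≤ dir then dir else 0 with hD
    have hDpos : 0 ≤ D := by rw [hD]; split_ifs <;> omega
    have hks : (pvLookup dict kv.1).isSome = true := pvLookup_isSome_of_mem hmem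
    -- the forward walk hits kv.1 at some step in 1..32
    have hmF : ∃ mF : Int, 1 ≤ mF ∧ mF ≤ 32 ∧ (dir + mF) % 32 = kv.1 := by
      refine ⟨if (kv.1 - dir) % 32 = 0 then 32 else (kv.1 - dir) % 32, ?_, ?_, ?_⟩ <;>
        split_ifs <;> omega
    obtain ⟨mF, hmF1, hmF32, hmFk⟩ := hmF
    have hPFex : ∃ d : Nat, (pvLookup dict (fposN dir (d + 1))).isSome = true := by
      refine ⟨mF.toNat - 1, ?_⟩
      have : fposN dir (mF.toNat - 1 + 1) = kv.1 := by
        simp only [fposN]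
        have : ((mF.toNat - 1 + 1 : Nat) : Int) = mF := by omega
        rw [this, hmFk]
      rw [this]; exact hks
    -- the backward walk hits kv.1 at some step in 1..D+32
    have hmB : ∃ mB : Int, 1 ≤ mB ∧ mB ≤ D + 32 ∧ bposN dir mB.toNat = kv.1 := by
      refine ⟨if kv.1 < dir then dir - kv.1 else D + 32 - kv.1, ?_, ?_, ?_⟩
      · split_ifs <;> omega
      · split_ifs <;> omega
      · simp only [bposN, ← hD]
        split_ifs <;> omega
    obtain ⟨mB, hmB1, hmB32, hmBk⟩ := hmB
    have hPBex : ∃ d : Nat, (pvLookup dict (bposN dir (d + 1))).isSome = true := by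
      refine ⟨mB.toNat - 1, ?_⟩
      have : mB.toNat - 1 + 1 = mB.toNat := by omega
      rw [this, hmBk]; exact hks
    -- first-hit distances
    set dfN : Nat := Nat.find hPFex with hdfN
    set dbN : Nat := Nat.find hPBex with hdbN
    obtain ⟨fv, hFhit⟩ := Option.isSome_iff_exists.mp (Nat.find_spec hPFex)
    obtain ⟨bv, hBhit⟩ := Option.isSome_iff_exists.mp (Nat.find_spec hPBex)
    have hdfle : dfN ≤ mF.toNat - 1 := Nat.find_min' hPFex (by
      have : fposN dir (mF.toNat - 1 + 1) = kv.1 := by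
        simp only [fposN]
        have : ((mF.toNat - 1 + 1 : Nat) : Int) = mF := by omega
        rw [this, hmFk]
      rw [this]; exact hks)
    have hdble : dbN ≤ mB.toNat - 1 := Nat.find_min' hPBex (by
      have : mB.toNat - 1 + 1 = mB.toNat := by omega
      rw [this, hmBk]; exact hks)
    have hdf32 : (dfN : Int) + 1 ≤ 32 := by omega
    have hdbD : (dbN : Int) + 1 ≤ D + 32 := by omega
    have hFnone : ∀ i : Nat, 1 ≤ i → i ≤ dfN → pvLookup dict (fposN dir i) = none := by
      intro i h1 h2
      have hm := Nat.find_min hPFex (m := i - 1) (by omega)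
      rw [(by omega : i - 1 + 1 = i)] at hm
      cases hx : pvLookup dict (fposN dir i) with
      | none => rfl
      | some w => exact absurd (by rw [hx]; rfl) hm
    have hBnone : ∀ i : Nat, 1 ≤ i → i ≤ dbN → pvLookup dict (bposN dir i) = none := by
      intro i h1 h2
      have hm := Nat.find_min hPBex (m := i - 1) (by omega)
      rw [(by omega : i - 1 + 1 = i)] at hm
      cases hx : pvLookup dict (bposN dir i) with
      | none => rfl
      | some w => exact absurd (by rw [hx]; rfl) hm
    -- A's two loops
    have hbinit : (if dir - 1 < 0 then (31 : Int) else dir - 1) = bposN dir (0 + 1) := by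
      simp only [bposN, ← hD]; push_cast; split_ifs <;> omega
    have hfinit : PySem.Int.mod (dir + 1) 32 = fposN dir (0 + 1) := by
      rw [PySem.Int.mod_eq_emod_of_pos (by norm_num)]; simp [fposN]
    have hAfwd : pvFwd dict dir 0 33 = some (fv, (0 : Int) + (dfN : Int) + 1) := by
      apply pvFwd_spec dict dir fv dfN 0 dir 0 33 hfinit (by norm_num) (by omega)
      · show pvLookup dict (fposN dir (0 + dfN + 1)) = some fv
        rw [(by omega : 0 + dfN + 1 = dfN + 1)]; exact hFhit
      · intro i h1 h2; exact hFnone i (by omega) (by omega)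
    have hAback : pvBack dict dir 0 (dir.toNat + 33) = some (bv, (0 : Int) + (dbN : Int) + 1) := by
      apply pvBack_spec dict dir bv dbN 0 dir 0 (dir.toNat + 33) hbinit (by norm_num)
        (by rw [← hD]; push_cast; omega) (by omega)
      · show pvLookup dict (bposN dir (0 + dbN + 1)) = some bv
        rw [(by omega : 0 + dbN + 1 = dbN + 1)]; exact hBhit
      · intro i h1 h2; exact hBnone i (by omega) (by omega)
    -- B's interleaved loop returns fv if dfN ≤ dbN else bv
    by_cases hle : dfN ≤ dbN
    · have hB : pvBoth dict dir dir (dir.toNat + 33) = fv := by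
        apply pvBoth_spec dict dir fv dfN 0 dir dir (dir.toNat + 33) hbinit hfinit
          (by rw [← hD]; push_cast; omega) (by omega)
        · intro i h1 h2
          exact ⟨hFnone i (by omega) (by omega), hBnone i (by omega) (by omega)⟩
        · left; rw [(by omega : 0 + dfN + 1 = dfN + 1)]; exact hFhit
      simp only [getClosestDirection, getClosestDirection_alt, hL, hAfwd, hAback, hB, ge_iff_le]
      rw [if_pos (by omega)]
    · have hlt : dbN < dfN := by omega
      have hB : pvBoth dict dir dir (dir.toNat + 33) = bv := by
        apply pvBoth_spec dict dir bv dbN 0 dir dir (dir.toNat + 33) hbinit hfinit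
          (by rw [← hD]; push_cast; omega) (by omega)
        · intro i h1 h2
          exact ⟨hFnone i (by omega) (by omega), hBnone i (by omega) (by omega)⟩
        · right
          rw [(by omega : 0 + dbN + 1 = dbN + 1)]
          exact ⟨hFnone (dbN + 1) (by omega) (by omega), hBhit⟩
      simp only [getClosestDirection, getClosestDirection_alt, hL, hAfwd, hAback, hB, ge_iff_le]
      rw [if_neg (by omega)]
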